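-- pv_equiv track=rewrite | github.com/DestYchen/LOGOS | app/services/reports.py | _translate_validation_message
-- ===== SOURCE A (Python) =====
-- def _translate_validation_message(message: str) -> str:
--     translations = {
--         "missing or invalid inputs for date comparison": "пропущены даты или значения невалидны",
--         "missing or invalid inputs for comparison": "пропущены данные или значения невалидны",
--         "missing or invalid anchor value": "значение опорного поля отсутствует или неверно",
--         "values are not equal across documents": "значения отличаются между документами",
--     }
--     result = message or ""
--     for eng, rus in translations.items():
--         result = result.replace(eng, rus)
--     return result
-- ===== SOURCE B (Python) =====
-- # Single left-to-right scan: at each position try the known English phrases in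
-- # order and emit the Russian translation (skipping the phrase) or copy one char.
-- _TRANSLATIONS = [
--     ("missing or invalid inputs for date comparison", "пропущены даты или значения невалидны"),
--     ("missing or invalid inputs for comparison", "пропущены данные или значения невалидны"),
--     ("missing or invalid anchor value", "значение опорного поля отсутствует или неверно"),
--     ("values are not equal across documents", "значения отличаются между документами"),
-- ]
--
--
-- def _translate_validation_message(message: str) -> str:
--     text = message or ""
--     parts = []
--     i = 0
--     n = len(text)
--     while i < n:
--         for eng, rus in _TRANSLATIONS:
--             if text.startswith(eng, i):
--                 parts.append(rus)
--                 i += len(eng)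
--                 break
--         else:
--             parts.append(text[i])
--             i += 1
--     return "".join(parts)
-- ===== Notes on version B (the rewrite author's own statement) =====
-- stated objective: alternative
-- what changed: Replaces four sequential whole-string str.replace passes (one per dictionary entry) with a single left-to-right scan that at each position tries the four English phrases in order and emits either the translation (skipping the phrase) or the current character.
import Mathlib
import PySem

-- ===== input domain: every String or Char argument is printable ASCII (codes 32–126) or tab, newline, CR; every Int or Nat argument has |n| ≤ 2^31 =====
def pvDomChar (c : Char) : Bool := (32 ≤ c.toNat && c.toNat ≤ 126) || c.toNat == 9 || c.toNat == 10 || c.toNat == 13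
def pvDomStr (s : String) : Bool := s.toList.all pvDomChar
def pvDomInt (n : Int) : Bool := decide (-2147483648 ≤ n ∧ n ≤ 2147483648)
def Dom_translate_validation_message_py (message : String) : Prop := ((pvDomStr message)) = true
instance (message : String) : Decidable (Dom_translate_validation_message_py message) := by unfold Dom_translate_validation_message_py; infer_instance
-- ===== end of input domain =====

set_option maxRecDepth 4000


-- B replaces A's four sequential whole-string replace passes by one left-to-right scan
-- that at each position tries the four English phrases in order (objective: alternative).

-- ===== PORT A =====
-- the dict literal, ported as its items in insertion order (keys are distinct)
def pvTransA : List (String × String) :=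
  [("missing or invalid inputs for date comparison", "пропущены даты или значения невалидны"),
   ("missing or invalid inputs for comparison", "пропущены данные или значения невалидны"),
   ("missing or invalid anchor value", "значение опорного поля отсутствует или неверно"),
   ("values are not equal across documents", "значения отличаются между документами")]

def translate_validation_message_py (message : String) : String :=
  -- result = message or ""
  let result := if message == "" then "" else message
  -- for eng, rus in translations.items(): result = result.replace(eng, rus)
  pvTransA.foldl (fun r p => PySem.Str.replace r p.1 p.2) result

-- ===== PORT B =====
-- the four English keys and Russian replacements, as code-point lists
def pvK1 : List Char := "missing or invalid inputs for date comparison".toList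
def pvK2 : List Char := "missing or invalid inputs for comparison".toList
def pvK3 : List Char := "missing or invalid anchor value".toList
def pvK4 : List Char := "values are not equal across documents".toList
def pvR1 : List Char := "пропущены даты или значения невалидны".toList
def pvR2 : List Char := "пропущены данные или значения невалидны".toList
def pvR3 : List Char := "значение опорного поля отсутствует или неверно".toList
def pvR4 : List Char := "значения отличаются между документами".toList


-- the _TRANSLATIONS list of Source B, on code points
def pvKeysB : List (List Char × List Char) := [(pvK1, pvR1), (pvK2, pvR2), (pvK3, pvR3), (pvK4, pvR4)]

-- the inner `for eng, rus in _TRANSLATIONS: if text.startswith(eng, i): … break / else:`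
def pvFirstMatch : List (List Char × List Char) → List Char → Option (List Char × Nat)
  | [], _ => none
  | (eng, rus) :: rest, s => if eng.isPrefixOf s then some (rus, eng.length) else pvFirstMatch rest s

-- the outer `while i < n` loop of Source B: emit a translation and skip the phrase, or copy one char
def pvScan (ks : List (List Char × List Char)) : List Char → List Char
  | [] => []
  | c :: t =>
    match pvFirstMatch ks (c :: t) with
    | some (rus, n) => rus ++ pvScan ks (List.drop (n - 1) t)
    | none => c :: pvScan ks t
termination_by s => s.length
decreasing_by
  · simp only [List.length_drop, List.length_cons]; omega
  · simp

def translate_validation_message_py_alt (message : String) : String :=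
  let text := if message == "" then "" else message
  String.ofList (pvScan pvKeysB text.toList)

-- ===== PRECONDITION & SPEC =====
def Spec_translate_validation_message_py (message : String) (out : String) : Prop := out = translate_validation_message_py_alt message
instance (message : String) (out : String) : Decidable (Spec_translate_validation_message_py message out) := by unfold Spec_translate_validation_message_py; infer_instance

-- ===== CLAIM (what is proved, stated in full; the proofs are below) =====
def Claim_equal_translate_validation_message_py : Prop := ∀ (message : String), Dom_translate_validation_message_py message → Spec_translate_validation_message_py message (translate_validation_message_py message)

-- ===== LEMMAS AND PROOFS =====

-- clean recursive form of Python str.replace (nonempty pattern)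
def pvRepl (old new : List Char) : List Char → List Char
  | [] => []
  | c :: t =>
    if old.isPrefixOf (c :: t) then new ++ pvRepl old new (List.drop (old.length - 1) t)
    else c :: pvRepl old new t
termination_by s => s.length
decreasing_by
  · simp only [List.length_drop, List.length_cons]; omega
  · simp

-- (c::t).drop |old| = t.drop (|old|-1) for nonempty old
theorem pvDrop_cons_len (old : List Char) (h : old ≠ []) (c : Char) (t : List Char) :
    List.drop old.length (c :: t) = List.drop (old.length - 1) t := by
  have h1 : old.length = (old.length - 1) + 1 := by
    cases old with
    | nil => exact absurd rfl h
    | cons x xs => simp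
  rw [h1]; rfl

theorem pvRepl_match (old new : List Char) (h : old ≠ []) (l : List Char) (hp : old <+: l) :
    pvRepl old new l = new ++ pvRepl old new (List.drop old.length l) := by
  cases l with
  | nil =>
    have := hp.length_le
    cases old with
    | nil => exact absurd rfl h
    | cons x xs => simp at this
  | cons c t =>
    rw [pvRepl, if_pos (List.isPrefixOf_iff_prefix.mpr hp), pvDrop_cons_len old h c t]

theorem pvRepl_nomatch (old new : List Char) (c : Char) (t : List Char)
    (h : ¬ old <+: (c :: t)) :
    pvRepl old new (c :: t) = c :: pvRepl old new t := by
  rw [pvRepl, if_neg (fun hb => h (List.isPrefixOf_iff_prefix.mp hb))]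

-- bridge: PySem.Chars.replace = pvRepl for nonempty pattern
theorem pvGo_eq (old new : List Char) (h : old ≠ []) :
    ∀ (fuel : Nat) (l acc : List Char), l.length ≤ fuel →
      PySem.Chars.replace.go old new fuel l acc = acc.reverse ++ pvRepl old new l := by
  intro fuel
  induction fuel with
  | zero =>
    intro l acc hl
    have : l = [] := by cases l <;> simp_all
    subst this
    simp [PySem.Chars.replace.go, pvRepl]
  | succ n ih =>
    intro l acc hl
    cases l with
    | nil => simp [PySem.Chars.replace.go, pvRepl]
    | cons c t =>
      rw [PySem.Chars.replace.go]
      by_cases hp : old.isPrefixOf (c :: t)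
      · rw [if_pos hp]
        have hpre : old <+: (c :: t) := List.isPrefixOf_iff_prefix.mp hp
        have hlen : (List.drop old.length (c :: t)).length ≤ n := by
          have h1 : 1 ≤ old.length := by
            cases old with
            | nil => exact absurd rfl h
            | cons x xs => simp
          simp only [List.length_drop, List.length_cons]
          simp only [List.length_cons] at hl
          omega
        rw [ih _ _ hlen, pvRepl_match old new h _ hpre]
        simp
      · rw [if_neg hp]
        have hlen : t.length ≤ n := by simp only [List.length_cons] at hl; omega
        rw [ih _ _ hlen, pvRepl_nomatch old new c t (fun hq => hp (List.isPrefixOf_iff_prefix.mpr hq))]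
        simp

theorem pvReplace_eq (s old new : List Char) (h : old ≠ []) :
    PySem.Chars.replace s old new = pvRepl old new s := by
  rw [PySem.Chars.replace, if_neg (by simp [List.isEmpty_iff, h]), pvGo_eq old new h s.length s [] le_rfl]
  simp

-- prefix testing through one replace pass: an ASCII pattern q is a prefix of the
-- replaced string iff it is a prefix of the original and no occurrence of `old`
-- starts inside the first |q| positions (the replacement starts with a non-ASCII char)
theorem pvPrefix_pvRepl (old r : List Char) (_hold : old ≠ [])
    (hr : r ≠ []) (hrh : 128 ≤ (r.headD 'x').toNat) :
    ∀ (q : List Char), (∀ c ∈ q, c.toNat < 128) →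
      ∀ t, (q <+: pvRepl old r t ↔ q <+: t ∧ ∀ p < q.length, ¬ old <+: t.drop p) := by
  intro q
  induction q with
  | nil => intro _ t; simp
  | cons d q' ih =>
    intro hq t
    cases t with
    | nil =>
      simp [pvRepl]
    | cons c t' =>
      by_cases hp : old <+: (c :: t')
      · rw [pvRepl, if_pos (List.isPrefixOf_iff_prefix.mpr hp)]
        constructor
        · intro hcon
          cases r with
          | nil => exact absurd rfl hr
          | cons e rs =>
            have : d = e := by
              have := hcon
              rw [List.cons_append] at this
              exact (List.cons_prefix_cons.mp this).1
            have hd : d.toNat < 128 := hq d (by simp)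
            simp [this] at hd
            simp at hrh
            omega
        · rintro ⟨-, hno⟩
          exact absurd hp (by simpa using hno 0 (by simp))
      · rw [pvRepl_nomatch old r c t' hp]
        rw [List.cons_prefix_cons, List.cons_prefix_cons,
            ih (fun c hc => hq c (by simp [hc])) t']
        constructor
        · rintro ⟨hdc, hq', hno⟩
          refine ⟨⟨hdc, hq'⟩, ?_⟩
          intro p hp'
          cases p with
          | zero => simpa using hp
          | succ p' => simpa using hno p' (by simpa using hp')
        · rintro ⟨⟨hdc, hq'⟩, hno⟩
          exact ⟨hdc, hq', fun p hp' => by simpa using hno (p + 1) (by simpa using hp')⟩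

-- splitting one replace pass at a position before which no match starts
theorem pvSplit_pvRepl (old r : List Char) (_hold : old ≠ []) :
    ∀ (m : Nat) (t : List Char), m ≤ t.length →
      (∀ p < m, ¬ old <+: t.drop p) →
      pvRepl old r t = t.take m ++ pvRepl old r (t.drop m) := by
  intro m
  induction m with
  | zero => intro t _ _; simp
  | succ n ih =>
    intro t hm hno
    cases t with
    | nil => simp at hm
    | cons c t' =>
      rw [pvRepl_nomatch old r c t' (by simpa using hno 0 (by simp))]
      rw [ih t' (by simpa using hm) (fun p hp => by simpa using hno (p + 1) (by simpa using hp))]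
      simp

-- a replace pass passes over a block containing no occurrence of old's head char
theorem pvSkip_pvRepl (old r : List Char) (e : Char) (he : old.head? = some e) :
    ∀ (a t : List Char), (∀ c ∈ a, c ≠ e) →
      pvRepl old r (a ++ t) = a ++ pvRepl old r t := by
  intro a
  induction a with
  | nil => intro t _; simp
  | cons c a' ih =>
    intro t ha
    have hnp : ¬ old <+: (c :: (a' ++ t)) := by
      cases old with
      | nil => simp at he
      | cons x oe =>
        have hx : x = e := by simpa using he
        subst hx
        intro hcon
        exact absurd (List.cons_prefix_cons.mp hcon).1.symm (ha c (by simp))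
    rw [List.cons_append, pvRepl_nomatch old r c (a' ++ t) hnp,
        ih t (fun c hc => ha c (by simp [hc]))]
    simp

-- prefix of an append splits
theorem pvPrefix_append_cases (q u v : List Char) (h : q <+: u ++ v) :
    q <+: u ∨ u <+: q := by
  by_cases hl : q.length ≤ u.length
  · left
    rw [List.prefix_iff_eq_take] at h ⊢
    rw [h, List.take_append_of_le_length hl]
    rw [List.length_take]
    congr 1
    omega
  · right
    obtain ⟨w, hw⟩ := h
    rw [List.prefix_iff_eq_take]
    have : List.take u.length (u ++ v) = List.take u.length (q ++ w) := by rw [hw]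
    rw [List.take_left, List.take_append_of_le_length (by omega)] at this
    exact this

-- no proper internal overlap between key a and key b
def pvOvFree (a b : List Char) : Bool :=
  (List.range a.length).all fun p =>
    decide (p = 0) || (!(a.drop p).isPrefixOf b && !b.isPrefixOf (a.drop p))

-- if a <+: s and pvOvFree a b, then b does not start strictly inside the a-prefix of s
theorem pvNo_inner_start (a b s : List Char) (ha : a <+: s) (hov : pvOvFree a b = true) :
    ∀ p, 0 < p → p < a.length → ¬ b <+: s.drop p := by
  intro p hp0 hpl hb
  obtain ⟨w, hw⟩ := ha
  subst hw
  rw [List.drop_append_of_le_length (by omega)] at hb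
  have hcase := pvPrefix_append_cases b (a.drop p) w hb
  have := (List.all_eq_true.mp hov) p (by simp [hpl])
  simp only [Bool.or_eq_true, decide_eq_true_eq, Bool.and_eq_true, Bool.not_eq_true'] at this
  rcases this with h0 | ⟨h1, h2⟩
  · omega
  · rcases hcase with h | h
    · exact absurd (List.isPrefixOf_iff_prefix.mpr h) (by simp [h2])
    · exact absurd (List.isPrefixOf_iff_prefix.mpr h) (by simp [h1])

-- dropping past a region with no match commutes with the replace pass
theorem pvDrop_pvRepl (old r : List Char) (hold : old ≠ []) (s : List Char) (p : Nat)
    (hps : p ≤ s.length) (hno : ∀ q < p, ¬ old <+: s.drop q) :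
    (pvRepl old r s).drop p = pvRepl old r (s.drop p) := by
  rw [pvSplit_pvRepl old r hold p s hps hno]
  rw [List.drop_append_of_le_length (by simp [hps]), List.drop_take]
  simp

-- ASCII facts about the keys
theorem pvA2 : ∀ c ∈ pvK2, c.toNat < 128 := by
  have h : (pvK2.all fun c => decide (c.toNat < 128)) = true := by decide
  rw [List.all_eq_true] at h; simpa using h
theorem pvA3 : ∀ c ∈ pvK3, c.toNat < 128 := by
  have h : (pvK3.all fun c => decide (c.toNat < 128)) = true := by decide
  rw [List.all_eq_true] at h; simpa using h
theorem pvA4 : ∀ c ∈ pvK4, c.toNat < 128 := by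
  have h : (pvK4.all fun c => decide (c.toNat < 128)) = true := by decide
  rw [List.all_eq_true] at h; simpa using h

-- the prefix lemma specialised to the three passes it is applied through
theorem pvP1 (q : List Char) (hq : ∀ c ∈ q, c.toNat < 128) (t : List Char) :
    q <+: pvRepl pvK1 pvR1 t ↔ q <+: t ∧ ∀ p < q.length, ¬ pvK1 <+: t.drop p :=
  pvPrefix_pvRepl pvK1 pvR1 (by decide) (by decide) (by decide) q hq t
theorem pvP2 (q : List Char) (hq : ∀ c ∈ q, c.toNat < 128) (t : List Char) :
    q <+: pvRepl pvK2 pvR2 t ↔ q <+: t ∧ ∀ p < q.length, ¬ pvK2 <+: t.drop p :=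
  pvPrefix_pvRepl pvK2 pvR2 (by decide) (by decide) (by decide) q hq t
theorem pvP3 (q : List Char) (hq : ∀ c ∈ q, c.toNat < 128) (t : List Char) :
    q <+: pvRepl pvK3 pvR3 t ↔ q <+: t ∧ ∀ p < q.length, ¬ pvK3 <+: t.drop p :=
  pvPrefix_pvRepl pvK3 pvR3 (by decide) (by decide) (by decide) q hq t

theorem pvOv21 : pvOvFree pvK2 pvK1 = true := by decide
theorem pvOv31 : pvOvFree pvK3 pvK1 = true := by decide
theorem pvOv32 : pvOvFree pvK3 pvK2 = true := by decide
theorem pvOv41 : pvOvFree pvK4 pvK1 = true := by decide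
theorem pvOv42 : pvOvFree pvK4 pvK2 = true := by decide
theorem pvOv43 : pvOvFree pvK4 pvK3 = true := by decide

-- the Russian replacements never contain the head character of a key
theorem pvNoM1 : ∀ c ∈ pvR1, c ≠ 'm' := by
  have h : (pvR1.all fun c => decide (c ≠ 'm')) = true := by decide
  rw [List.all_eq_true] at h; simpa using h
theorem pvNoV1 : ∀ c ∈ pvR1, c ≠ 'v' := by
  have h : (pvR1.all fun c => decide (c ≠ 'v')) = true := by decide
  rw [List.all_eq_true] at h; simpa using h
theorem pvNoM2 : ∀ c ∈ pvR2, c ≠ 'm' := by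
  have h : (pvR2.all fun c => decide (c ≠ 'm')) = true := by decide
  rw [List.all_eq_true] at h; simpa using h
theorem pvNoV2 : ∀ c ∈ pvR2, c ≠ 'v' := by
  have h : (pvR2.all fun c => decide (c ≠ 'v')) = true := by decide
  rw [List.all_eq_true] at h; simpa using h
theorem pvNoV3 : ∀ c ∈ pvR3, c ≠ 'v' := by
  have h : (pvR3.all fun c => decide (c ≠ 'v')) = true := by decide
  rw [List.all_eq_true] at h; simpa using h

-- main: the four sequential replace passes equal the single scan
theorem pvMainAux : ∀ (N : Nat) (s : List Char), s.length ≤ N →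
    pvRepl pvK4 pvR4 (pvRepl pvK3 pvR3 (pvRepl pvK2 pvR2 (pvRepl pvK1 pvR1 s))) =
      pvScan pvKeysB s := by
  intro N
  induction N with
  | zero =>
    intro s hs
    have : s = [] := by cases s <;> simp_all
    subst this
    simp [pvRepl, pvScan]
  | succ N ih =>
    intro s hs
    cases s with
    | nil => simp [pvRepl, pvScan]
    | cons c t =>
      simp only [List.length_cons] at hs
      have hne1 : pvK1 ≠ [] := by decide
      have hne2 : pvK2 ≠ [] := by decide
      have hne3 : pvK3 ≠ [] := by decide
      have hne4 : pvK4 ≠ [] := by decide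
      by_cases h1 : pvK1 <+: (c :: t)
      · -- key 1 matches at this position
        rw [pvRepl_match pvK1 pvR1 hne1 _ h1,
            pvSkip_pvRepl pvK2 pvR2 'm' (by decide) pvR1 _ pvNoM1,
            pvSkip_pvRepl pvK3 pvR3 'm' (by decide) pvR1 _ pvNoM1,
            pvSkip_pvRepl pvK4 pvR4 'v' (by decide) pvR1 _ pvNoV1,
            pvDrop_cons_len pvK1 hne1 c t,
            ih (List.drop (pvK1.length - 1) t) (by simp only [List.length_drop]; omega)]
        conv_rhs => rw [pvScan]
        have hm : pvFirstMatch pvKeysB (c :: t) = some (pvR1, pvK1.length) := by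
          rw [pvKeysB, pvFirstMatch, if_pos (List.isPrefixOf_iff_prefix.mpr h1)]
        rw [hm]
      · by_cases h2 : pvK2 <+: (c :: t)
        · -- key 2 matches at this position
          have F1 : ∀ p < pvK2.length, ¬ pvK1 <+: (c :: t).drop p := by
            intro p hp
            rcases Nat.eq_zero_or_pos p with rfl | hp0
            · simpa using h1
            · exact pvNo_inner_start pvK2 pvK1 _ h2 pvOv21 p hp0 hp
          rw [pvSplit_pvRepl pvK1 pvR1 hne1 pvK2.length _ h2.length_le F1,
              show (c :: t).take pvK2.length = pvK2 from (List.prefix_iff_eq_take.mp h2).symm,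
              pvRepl_match pvK2 pvR2 hne2 _ (List.prefix_append _ _), List.drop_left,
              pvSkip_pvRepl pvK3 pvR3 'm' (by decide) pvR2 _ pvNoM2,
              pvSkip_pvRepl pvK4 pvR4 'v' (by decide) pvR2 _ pvNoV2,
              pvDrop_cons_len pvK2 hne2 c t,
              ih (List.drop (pvK2.length - 1) t) (by simp only [List.length_drop]; omega)]
          conv_rhs => rw [pvScan]
          have hm : pvFirstMatch pvKeysB (c :: t) = some (pvR2, pvK2.length) := by
            rw [pvKeysB, pvFirstMatch,
                if_neg (fun hb => h1 (List.isPrefixOf_iff_prefix.mp hb)),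
                pvFirstMatch, if_pos (List.isPrefixOf_iff_prefix.mpr h2)]
          rw [hm]
        · by_cases h3 : pvK3 <+: (c :: t)
          · -- key 3 matches at this position
            have F1 : ∀ p < pvK3.length, ¬ pvK1 <+: (c :: t).drop p := by
              intro p hp
              rcases Nat.eq_zero_or_pos p with rfl | hp0
              · simpa using h1
              · exact pvNo_inner_start pvK3 pvK1 _ h3 pvOv31 p hp0 hp
            have hd1 : ∀ p ≤ pvK3.length,
                (pvRepl pvK1 pvR1 (c :: t)).drop p = pvRepl pvK1 pvR1 ((c :: t).drop p) :=
              fun p hp => pvDrop_pvRepl pvK1 pvR1 hne1 _ p (le_trans hp h3.length_le)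
                (fun q hq => F1 q (lt_of_lt_of_le hq hp))
            have F2 : ∀ p < pvK3.length, ¬ pvK2 <+: (pvRepl pvK1 pvR1 (c :: t)).drop p := by
              intro p hp hcon
              rw [hd1 p hp.le] at hcon
              have h' := ((pvP1 pvK2 pvA2 _).mp hcon).1
              rcases Nat.eq_zero_or_pos p with rfl | hp0
              · rw [List.drop_zero] at h'; exact h2 h'
              · exact pvNo_inner_start pvK3 pvK2 _ h3 pvOv32 p hp0 hp h'
            have hK3u1 : pvK3 <+: pvRepl pvK1 pvR1 (c :: t) := (pvP1 pvK3 pvA3 _).mpr ⟨h3, F1⟩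
            rw [pvSplit_pvRepl pvK2 pvR2 hne2 pvK3.length _ hK3u1.length_le F2,
                show (pvRepl pvK1 pvR1 (c :: t)).take pvK3.length = pvK3 from
                  (List.prefix_iff_eq_take.mp hK3u1).symm,
                hd1 pvK3.length le_rfl,
                pvRepl_match pvK3 pvR3 hne3 _ (List.prefix_append _ _), List.drop_left,
                pvSkip_pvRepl pvK4 pvR4 'v' (by decide) pvR3 _ pvNoV3,
                pvDrop_cons_len pvK3 hne3 c t,
                ih (List.drop (pvK3.length - 1) t) (by simp only [List.length_drop]; omega)]
            conv_rhs => rw [pvScan]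
            have hm : pvFirstMatch pvKeysB (c :: t) = some (pvR3, pvK3.length) := by
              rw [pvKeysB, pvFirstMatch,
                  if_neg (fun hb => h1 (List.isPrefixOf_iff_prefix.mp hb)),
                  pvFirstMatch,
                  if_neg (fun hb => h2 (List.isPrefixOf_iff_prefix.mp hb)),
                  pvFirstMatch, if_pos (List.isPrefixOf_iff_prefix.mpr h3)]
            rw [hm]
          · by_cases h4 : pvK4 <+: (c :: t)
            · -- key 4 matches at this position
              have F1 : ∀ p < pvK4.length, ¬ pvK1 <+: (c :: t).drop p := by
                intro p hp
                rcases Nat.eq_zero_or_pos p with rfl | hp0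
                · simpa using h1
                · exact pvNo_inner_start pvK4 pvK1 _ h4 pvOv41 p hp0 hp
              have hd1 : ∀ p ≤ pvK4.length,
                  (pvRepl pvK1 pvR1 (c :: t)).drop p = pvRepl pvK1 pvR1 ((c :: t).drop p) :=
                fun p hp => pvDrop_pvRepl pvK1 pvR1 hne1 _ p (le_trans hp h4.length_le)
                  (fun q hq => F1 q (lt_of_lt_of_le hq hp))
              have F2 : ∀ p < pvK4.length, ¬ pvK2 <+: (pvRepl pvK1 pvR1 (c :: t)).drop p := by
                intro p hp hcon
                rw [hd1 p hp.le] at hcon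
                have h' := ((pvP1 pvK2 pvA2 _).mp hcon).1
                rcases Nat.eq_zero_or_pos p with rfl | hp0
                · rw [List.drop_zero] at h'; exact h2 h'
                · exact pvNo_inner_start pvK4 pvK2 _ h4 pvOv42 p hp0 hp h'
              have hK4u1 : pvK4 <+: pvRepl pvK1 pvR1 (c :: t) := (pvP1 pvK4 pvA4 _).mpr ⟨h4, F1⟩
              have hd2 : ∀ p ≤ pvK4.length,
                  (pvRepl pvK2 pvR2 (pvRepl pvK1 pvR1 (c :: t))).drop p =
                    pvRepl pvK2 pvR2 ((pvRepl pvK1 pvR1 (c :: t)).drop p) :=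
                fun p hp => pvDrop_pvRepl pvK2 pvR2 hne2 _ p (le_trans hp hK4u1.length_le)
                  (fun q hq => F2 q (lt_of_lt_of_le hq hp))
              have F3 : ∀ p < pvK4.length,
                  ¬ pvK3 <+: (pvRepl pvK2 pvR2 (pvRepl pvK1 pvR1 (c :: t))).drop p := by
                intro p hp hcon
                rw [hd2 p hp.le, hd1 p hp.le] at hcon
                have h' := ((pvP1 pvK3 pvA3 _).mp ((pvP2 pvK3 pvA3 _).mp hcon).1).1
                rcases Nat.eq_zero_or_pos p with rfl | hp0
                · rw [List.drop_zero] at h'; exact h3 h'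
                · exact pvNo_inner_start pvK4 pvK3 _ h4 pvOv43 p hp0 hp h'
              have hK4u2 : pvK4 <+: pvRepl pvK2 pvR2 (pvRepl pvK1 pvR1 (c :: t)) :=
                (pvP2 pvK4 pvA4 _).mpr ⟨hK4u1, F2⟩
              rw [pvSplit_pvRepl pvK3 pvR3 hne3 pvK4.length _ hK4u2.length_le F3,
                  show (pvRepl pvK2 pvR2 (pvRepl pvK1 pvR1 (c :: t))).take pvK4.length = pvK4 from
                    (List.prefix_iff_eq_take.mp hK4u2).symm,
                  hd2 pvK4.length le_rfl, hd1 pvK4.length le_rfl,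
                  pvRepl_match pvK4 pvR4 hne4 _ (List.prefix_append _ _), List.drop_left,
                  pvDrop_cons_len pvK4 hne4 c t,
                  ih (List.drop (pvK4.length - 1) t) (by simp only [List.length_drop]; omega)]
              conv_rhs => rw [pvScan]
              have hm : pvFirstMatch pvKeysB (c :: t) = some (pvR4, pvK4.length) := by
                rw [pvKeysB, pvFirstMatch,
                    if_neg (fun hb => h1 (List.isPrefixOf_iff_prefix.mp hb)),
                    pvFirstMatch,
                    if_neg (fun hb => h2 (List.isPrefixOf_iff_prefix.mp hb)),
                    pvFirstMatch,
                    if_neg (fun hb => h3 (List.isPrefixOf_iff_prefix.mp hb)),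
                    pvFirstMatch, if_pos (List.isPrefixOf_iff_prefix.mpr h4)]
              rw [hm]
            · -- no key matches at this position: all four passes copy the head char
              have e1 := pvRepl_nomatch pvK1 pvR1 c t h1
              have nh2' : ¬ pvK2 <+: (c :: pvRepl pvK1 pvR1 t) := by
                rw [← e1]
                exact fun hc => h2 ((pvP1 pvK2 pvA2 _).mp hc).1
              have e2 := pvRepl_nomatch pvK2 pvR2 c _ nh2'
              have nh3' : ¬ pvK3 <+: (c :: pvRepl pvK2 pvR2 (pvRepl pvK1 pvR1 t)) := by
                rw [← e2, ← e1]
                exact fun hc => h3 ((pvP1 pvK3 pvA3 _).mp ((pvP2 pvK3 pvA3 _).mp hc).1).1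
              have e3 := pvRepl_nomatch pvK3 pvR3 c _ nh3'
              have nh4' : ¬ pvK4 <+: (c :: pvRepl pvK3 pvR3 (pvRepl pvK2 pvR2 (pvRepl pvK1 pvR1 t))) := by
                rw [← e3, ← e2, ← e1]
                exact fun hc =>
                  h4 ((pvP1 pvK4 pvA4 _).mp ((pvP2 pvK4 pvA4 _).mp ((pvP3 pvK4 pvA4 _).mp hc).1).1).1
              have e4 := pvRepl_nomatch pvK4 pvR4 c _ nh4'
              rw [e1, e2, e3, e4, ih t (by omega)]
              conv_rhs => rw [pvScan]
              have hm : pvFirstMatch pvKeysB (c :: t) = none := by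
                rw [pvKeysB, pvFirstMatch,
                    if_neg (fun hb => h1 (List.isPrefixOf_iff_prefix.mp hb)),
                    pvFirstMatch,
                    if_neg (fun hb => h2 (List.isPrefixOf_iff_prefix.mp hb)),
                    pvFirstMatch,
                    if_neg (fun hb => h3 (List.isPrefixOf_iff_prefix.mp hb)),
                    pvFirstMatch,
                    if_neg (fun hb => h4 (List.isPrefixOf_iff_prefix.mp hb)),
                    pvFirstMatch]
              rw [hm]

theorem pvMain (s : List Char) :
    pvRepl pvK4 pvR4 (pvRepl pvK3 pvR3 (pvRepl pvK2 pvR2 (pvRepl pvK1 pvR1 s))) =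
      pvScan pvKeysB s := pvMainAux s.length s le_rfl

-- bridging each PySem replace pass to its clean recursion, at the four literal pairs
theorem pvCR1 (s : List Char) :
    PySem.Chars.replace s "missing or invalid inputs for date comparison".toList
      "пропущены даты или значения невалидны".toList = pvRepl pvK1 pvR1 s :=
  pvReplace_eq s _ _ (by decide)
theorem pvCR2 (s : List Char) :
    PySem.Chars.replace s "missing or invalid inputs for comparison".toList
      "пропущены данные или значения невалидны".toList = pvRepl pvK2 pvR2 s :=
  pvReplace_eq s _ _ (by decide)
theorem pvCR3 (s : List Char) :
    PySem.Chars.replace s "missing or invalid anchor value".toList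
      "значение опорного поля отсутствует или неверно".toList = pvRepl pvK3 pvR3 s :=
  pvReplace_eq s _ _ (by decide)
theorem pvCR4 (s : List Char) :
    PySem.Chars.replace s "values are not equal across documents".toList
      "значения отличаются между документами".toList = pvRepl pvK4 pvR4 s :=
  pvReplace_eq s _ _ (by decide)

-- glue
theorem pvPorts_eq (message : String) :
    translate_validation_message_py message = translate_validation_message_py_alt message := by
  unfold translate_validation_message_py translate_validation_message_py_alt
  simp only [pvTransA, List.foldl_cons, List.foldl_nil, PySem.Str.replace]
  rw [pvCR1, pvCR2, pvCR3, pvCR4]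
  simp only [String.toList_ofList]
  rw [pvMain]

-- ===== VERDICT (by name: the statement is the Claim_ definition above) =====
theorem translate_validation_message_py_spec : Claim_equal_translate_validation_message_py := by
  intro message _
  exact pvPorts_eq message
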